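-- pv_equiv track=rewrite | github.com/sathish0804/POC_2 | app/services/job_service.py | split_frame_ranges
-- ===== SOURCE A (Python) =====
-- from typing import Any, Dict, List, Tuple, Optional
--
-- def split_frame_ranges(total_frames: int, num_processes: int) -> List[Tuple[int, int]]:
--     if num_processes <= 0:
--         return [(0, total_frames)]
--     base = total_frames // num_processes
--     remainder = total_frames % num_processes
--     ranges: List[Tuple[int, int]] = []
--     start = 0
--     for i in range(num_processes):
--         count = base + (1 if i < remainder else 0)
--         end = start + count
--         ranges.append((start, end))
--         start = end
--     return ranges
-- ===== SOURCE B (Python) =====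
-- from typing import List, Tuple
--
-- def split_frame_ranges(total_frames: int, num_processes: int) -> List[Tuple[int, int]]:
--     if num_processes <= 0:
--         return [(0, total_frames)]
--     base = total_frames // num_processes
--     remainder = total_frames % num_processes
--     def b(i: int) -> int:
--         return i * base + min(i, remainder)
--     return [(b(i), b(i + 1)) for i in range(num_processes)]
-- ===== Notes on version B (the rewrite author's own statement) =====
-- stated objective: alternative
-- what changed: Replaced the accumulator loop threading a running start through each iteration with a closed-form boundary function b(i) = i*base + min(i, remainder), so each range is computed independently from its index.
import Mathlib
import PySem

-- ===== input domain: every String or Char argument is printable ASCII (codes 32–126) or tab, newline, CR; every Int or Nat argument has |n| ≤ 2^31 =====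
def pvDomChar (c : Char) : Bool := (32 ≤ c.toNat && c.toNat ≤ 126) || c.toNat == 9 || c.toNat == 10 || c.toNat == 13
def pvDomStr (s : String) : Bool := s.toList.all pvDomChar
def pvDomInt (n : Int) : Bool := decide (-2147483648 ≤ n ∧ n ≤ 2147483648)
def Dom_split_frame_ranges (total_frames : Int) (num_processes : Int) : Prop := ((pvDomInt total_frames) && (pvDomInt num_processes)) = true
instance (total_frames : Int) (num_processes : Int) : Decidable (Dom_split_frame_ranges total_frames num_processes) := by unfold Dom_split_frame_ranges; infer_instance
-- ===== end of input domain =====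

-- B replaces the running-accumulator loop with a closed-form boundary b(i) = i*base + min(i, remainder); alternative decomposition, same O(n) cost.
-- ===== PORT A =====
-- Transliteration of A: accumulator loop threading `start` through range(num_processes)
def split_frame_ranges (total_frames : Int) (num_processes : Int) : List (Int × Int) :=
  if num_processes ≤ 0 then [(0, total_frames)]
  else
    let base := PySem.Int.floordiv total_frames num_processes
    let remainder := PySem.Int.mod total_frames num_processes
    let res := (PySem.List.pyRange 0 num_processes 1).foldl
      (fun (st : List (Int × Int) × Int) i =>
        let count := base + (if i < remainder then 1 else 0)
        let endv := st.2 + count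
        (st.1 ++ [(st.2, endv)], endv)) ([], 0)
    res.1

-- ===== PORT B =====
-- B's closed-form boundary: b(i) = i*base + min(i, remainder)
def sfrBound (base : Int) (remainder : Int) (i : Int) : Int := i * base + min i remainder

def split_frame_ranges_alt (total_frames : Int) (num_processes : Int) : List (Int × Int) :=
  if num_processes ≤ 0 then [(0, total_frames)]
  else
    let base := PySem.Int.floordiv total_frames num_processes
    let remainder := PySem.Int.mod total_frames num_processes
    (PySem.List.pyRange 0 num_processes 1).map
      (fun i => (sfrBound base remainder i, sfrBound base remainder (i + 1)))

-- ===== PRECONDITION & SPEC =====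
def Spec_split_frame_ranges (total_frames : Int) (num_processes : Int) (out : List (Int × Int)) : Prop := out = split_frame_ranges_alt total_frames num_processes
instance (total_frames : Int) (num_processes : Int) (out : List (Int × Int)) : Decidable (Spec_split_frame_ranges total_frames num_processes out) := by unfold Spec_split_frame_ranges; infer_instance

-- ===== CLAIM (what is proved, stated in full; the proofs are below) =====
def Claim_equal_split_frame_ranges : Prop := ∀ (total_frames : Int) (num_processes : Int), Dom_split_frame_ranges total_frames num_processes → Spec_split_frame_ranges total_frames num_processes (split_frame_ranges total_frames num_processes)

-- ===== LEMMAS AND PROOFS =====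

theorem sfrBound_step (base remainder i : Int) :
    sfrBound base remainder i + (base + (if i < remainder then 1 else 0)) = sfrBound base remainder (i + 1) := by
  simp only [sfrBound, min_def, add_mul, one_mul]
  split_ifs <;> omega

theorem sfr_loop (base remainder : Int) (a b : Int) (h : a ≤ b) (acc : List (Int × Int)) :
    (PySem.List.pyRange a b 1).foldl
      (fun (st : List (Int × Int) × Int) i =>
        let count := base + (if i < remainder then 1 else 0)
        let endv := st.2 + count
        (st.1 ++ [(st.2, endv)], endv)) (acc, sfrBound base remainder a)
    = (acc ++ (PySem.List.pyRange a b 1).map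
        (fun i => (sfrBound base remainder i, sfrBound base remainder (i + 1))),
       sfrBound base remainder b) := by
  generalize hk : (b - a).toNat = k
  induction k generalizing a acc with
  | zero =>
      have hab : a = b := by omega
      subst hab
      rw [PySem.List.pyRange_one_eq_nil le_rfl]
      simp
  | succ k ih =>
      have hab : a < b := by omega
      rw [PySem.List.pyRange_one_cons hab]
      simp only [List.foldl_cons, List.map_cons]
      rw [sfrBound_step]
      rw [ih (a + 1) (by omega) (acc ++ [(sfrBound base remainder a, sfrBound base remainder (a + 1))]) (by omega)]
      simp

-- ===== VERDICT (by name: the statement is the Claim_ definition above) =====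
theorem split_frame_ranges_spec : Claim_equal_split_frame_ranges := by
  intro total_frames num_processes _
  unfold Spec_split_frame_ranges split_frame_ranges split_frame_ranges_alt
  by_cases h : num_processes ≤ 0
  · simp [h]
  · simp only [h, if_false]
    have h0 : (0 : Int) ≤ num_processes := by omega
    have hr : (0:Int) ≤ PySem.Int.mod total_frames num_processes :=
      PySem.Int.mod_nonneg _ (by omega)
    have := sfr_loop (PySem.Int.floordiv total_frames num_processes)
      (PySem.Int.mod total_frames num_processes) 0 num_processes h0 []
    simp only [sfrBound, zero_mul, zero_add, min_eq_left hr] at this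
    simpa [sfrBound] using congrArg Prod.fst this
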